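-- pv_equiv track=rewrite | github.com/Javded-akuma/megafon | product.py | changeString
-- ===== SOURCE A (Python) =====
-- def changeString(number, text):
--     if number == 1 < 5:
--         text_change = f'{number} {text}'
--         return text_change
--     elif number < 5 and number != 0:
--         prifex = 'а'
--         text_change = f'{number} {text}{prifex}'
--         return text_change
--     elif number < 20 or number == 0:
--         prifex = 'ов'
--         text_change = f'{number} {text}{prifex}'
--         return text_change
--     elif number > 19:
--         first_num = int(str(number)[:-1])
--         secend_num = int(str(number)[-1])
--         text_change = f'{str(first_num)+str(changeString(secend_num, text))}'
--         return text_change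
-- ===== SOURCE B (Python) =====
-- def _suffix(n):
--     if n == 1:
--         return ''
--     if n < 5 and n != 0:
--         return 'а'
--     return 'ов'
--
--
-- def changeString(number, text):
--     if number > 19:
--         s = str(number)
--         head, last = int(s[:-1]), int(s[-1])
--         return f'{head}{last} {text}{_suffix(last)}'
--     return f'{number} {text}{_suffix(number)}'
-- ===== Notes on version B (the rewrite author's own statement) =====
-- stated objective: simpler
-- what changed: B removes A's recursion: a direct suffix helper picks ''/'а'/'ов' from the deciding number (the last digit when number > 19), so the string is built in one step instead of recursing on int(str(number)[-1]).
import Mathlib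
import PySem

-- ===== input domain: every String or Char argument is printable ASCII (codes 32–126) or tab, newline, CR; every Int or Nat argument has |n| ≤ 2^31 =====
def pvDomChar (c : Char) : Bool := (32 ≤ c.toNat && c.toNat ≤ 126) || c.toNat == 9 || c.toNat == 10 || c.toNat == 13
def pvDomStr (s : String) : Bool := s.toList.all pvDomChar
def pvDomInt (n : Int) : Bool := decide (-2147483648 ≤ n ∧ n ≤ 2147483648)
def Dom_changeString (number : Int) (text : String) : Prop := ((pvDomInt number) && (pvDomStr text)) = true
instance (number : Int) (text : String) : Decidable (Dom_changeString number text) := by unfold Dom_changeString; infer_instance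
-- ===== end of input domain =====

-- B replaces A's recursion on the last digit by a direct, non-recursive suffix computation (objective: simpler).

-- ===== PORT A =====
-- A recurses (for number > 19) on the last digit, which is < 20, so the depth is at most 2;
-- the fuel argument is only a totality guard and is never exhausted (changeString passes fuel 2).
def changeStringGo : Nat → Int → String → String
  | 0, _, _ => ""  -- fuel guard; unreachable (recursion depth ≤ 2)
  | fuel + 1, number, text =>
    if number = 1 ∧ (1 : Int) < 5 then  -- Python `number == 1 < 5` chains to `number == 1 and 1 < 5`
      PySem.Int.toStr number ++ " " ++ text
    else if number < 5 ∧ number ≠ 0 then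
      PySem.Int.toStr number ++ " " ++ text ++ "а"
    else if number < 20 ∨ number = 0 then
      PySem.Int.toStr number ++ " " ++ text ++ "ов"
    else if number > 19 then
      let s := PySem.Int.toChars number                -- str(number); number > 19 here, so all decimal digits
      -- int(str(number)[:-1]) / int(str(number)[-1]): both int() calls always succeed here
      -- (s is a nonempty all-digit list), so Python never raises; `.getD 0` is never the `none` case.
      let first_num : Int := (PySem.Int.ofChars? (PySem.List.slice s none (some (-1)))).getD 0
      let secend_num : Int := (PySem.Int.ofChars? ((PySem.List.pyGet? s (-1)).elim [] (fun c => [c]))).getD 0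
      PySem.Int.toStr first_num ++ changeStringGo fuel secend_num text
    else ""  -- unreachable: the four branches cover every integer

def changeString (number : Int) (text : String) : String :=
  changeStringGo 2 number text

-- ===== PORT B =====
def pySuffix (n : Int) : String :=
  if n = 1 then "" else if n < 5 ∧ n ≠ 0 then "а" else "ов"

def changeString_alt (number : Int) (text : String) : String :=
  if number > 19 then
    let s := PySem.Int.toChars number
    let head : Int := (PySem.Int.ofChars? (PySem.List.slice s none (some (-1)))).getD 0
    let last : Int := (PySem.Int.ofChars? ((PySem.List.pyGet? s (-1)).elim [] (fun c => [c]))).getD 0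
    PySem.Int.toStr head ++ PySem.Int.toStr last ++ " " ++ text ++ pySuffix last
  else
    PySem.Int.toStr number ++ " " ++ text ++ pySuffix number

-- ===== PRECONDITION & SPEC =====
def Spec_changeString (number : Int) (text : String) (out : String) : Prop := out = changeString_alt number text
instance (number : Int) (text : String) (out : String) : Decidable (Spec_changeString number text out) := by unfold Spec_changeString; infer_instance

-- ===== CLAIM (what is proved, stated in full; the proofs are below) =====
def Claim_equal_changeString : Prop := ∀ (number : Int) (text : String), Dom_changeString number text → Spec_changeString number text (changeString number text)

-- ===== LEMMAS AND PROOFS =====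

lemma toDigitsCore10_append : ∀ (f n : Nat) (ds : List Char),
    Nat.toDigitsCore 10 f n ds = Nat.toDigitsCore 10 f n [] ++ ds := by
  intro f
  induction f with
  | zero => intro n ds; rfl
  | succ f ih =>
    intro n ds
    simp only [Nat.toDigitsCore]
    by_cases h : n / 10 = 0
    · simp [h]
    · rw [if_neg h, if_neg h, ih (n / 10) (Nat.digitChar (n % 10) :: ds),
        ih (n / 10) [Nat.digitChar (n % 10)]]
      simp

lemma toDigitsCore10_fuel (n : Nat) : ∀ (f₁ f₂ : Nat), n < f₁ → n < f₂ →
    Nat.toDigitsCore 10 f₁ n [] = Nat.toDigitsCore 10 f₂ n [] := by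
  induction n using Nat.strong_induction_on with
  | _ n ih =>
    intro f₁ f₂ h₁ h₂
    obtain ⟨g₁, rfl⟩ : ∃ g, f₁ = g + 1 := ⟨f₁ - 1, by omega⟩
    obtain ⟨g₂, rfl⟩ : ∃ g, f₂ = g + 1 := ⟨f₂ - 1, by omega⟩
    simp only [Nat.toDigitsCore]
    by_cases h : n / 10 = 0
    · simp [h]
    · rw [if_neg h, if_neg h,
        toDigitsCore10_append g₁ (n / 10) [Nat.digitChar (n % 10)],
        toDigitsCore10_append g₂ (n / 10) [Nat.digitChar (n % 10)],
        ih (n / 10) (by omega) g₁ g₂ (by omega) (by omega)]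

lemma toDigits10_step (m : Nat) (hm : 10 ≤ m) :
    Nat.toDigits 10 m = Nat.toDigits 10 (m / 10) ++ [Nat.digitChar (m % 10)] := by
  have h : ¬ m / 10 = 0 := by omega
  simp only [Nat.toDigits]
  conv_lhs => simp only [Nat.toDigitsCore]
  rw [if_neg h, toDigitsCore10_append m (m / 10) [Nat.digitChar (m % 10)]]
  congr 1
  exact toDigitsCore10_fuel (m / 10) m (m / 10 + 1) (by omega) (by omega)

-- A's base branches (number < 20) agree with B's direct suffix computation.
lemma go_base (f : Nat) (d : Int) (t : String) (hd : d < 20) :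
    changeStringGo (f + 1) d t = PySem.Int.toStr d ++ " " ++ t ++ pySuffix d := by
  by_cases h1 : d = 1
  · simp only [changeStringGo, pySuffix]
    rw [if_pos ⟨h1, by norm_num⟩, if_pos h1, String.append_empty]
  · by_cases h2 : d < 5 ∧ d ≠ 0
    · simp only [changeStringGo, pySuffix]
      rw [if_neg (fun hc => h1 hc.1), if_pos h2, if_neg h1, if_pos h2]
    · simp only [changeStringGo, pySuffix]
      rw [if_neg (fun hc => h1 hc.1), if_neg h2, if_pos (Or.inl hd), if_neg h1, if_neg h2]

-- A's recursive branch, unfolded once.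
lemma go_gt (f : Nat) (n : Int) (t : String) (h : n > 19) :
    changeStringGo (f + 1) n t =
      PySem.Int.toStr ((PySem.Int.ofChars? (PySem.List.slice (PySem.Int.toChars n) none (some (-1)))).getD 0) ++
        changeStringGo f
          ((PySem.Int.ofChars? ((PySem.List.pyGet? (PySem.Int.toChars n) (-1)).elim [] (fun c => [c]))).getD 0) t := by
  have h1 : ¬ (n = 1 ∧ (1 : Int) < 5) := by omega
  have h2 : ¬ (n < 5 ∧ n ≠ 0) := by omega
  have h3 : ¬ (n < 20 ∨ n = 0) := by omega
  simp only [changeStringGo]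
  rw [if_neg h1, if_neg h2, if_neg h3, if_pos h]

-- ===== VERDICT (by name: the statement is the Claim_ definition above) =====
theorem changeString_spec : Claim_equal_changeString := by
  intro n t _
  show changeString n t = changeString_alt n t
  by_cases h : n > 19
  · have e : changeString n t = changeStringGo (1 + 1) n t := rfl
    have hchars : PySem.Int.toChars n =
        Nat.toDigits 10 (n.toNat / 10) ++ [Nat.digitChar (n.toNat % 10)] := by
      have h0 : ¬ n < 0 := by omega
      simp only [PySem.Int.toChars, if_neg h0]
      exact toDigits10_step n.toNat (by omega)
    have hget : PySem.List.pyGet? (PySem.Int.toChars n) (-1) =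
        some (Nat.digitChar (n.toNat % 10)) := by
      rw [hchars, PySem.List.pyGet?_neg_one]
      simp
    have hlast :
        ((PySem.Int.ofChars? ((PySem.List.pyGet? (PySem.Int.toChars n) (-1)).elim [] (fun c => [c]))).getD 0) < 20 := by
      rw [hget]
      have h10 : n.toNat % 10 < 10 := by omega
      generalize hgen : n.toNat % 10 = r at h10 ⊢
      interval_cases r <;> decide
    rw [e, go_gt 1 n t h]
    have e1 : changeStringGo 1 = changeStringGo (0 + 1) := rfl
    rw [e1, go_base 0 _ t hlast]
    unfold changeString_alt
    rw [if_pos h]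
    simp only [String.append_assoc]
  · have e : changeString n t = changeStringGo (1 + 1) n t := rfl
    rw [e, go_base 1 n t (by omega)]
    unfold changeString_alt
    rw [if_neg h]
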